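-- pv_equiv track=rewrite | github.com/KOMBATEYendoubeGloria/sojalegumineusefinal | dashboard/views.py | get_legume_colors
-- ===== SOURCE A (Python) =====
-- def get_legume_colors(labels):
--     """Génère une palette de couleurs cohérente pour une liste de labels."""
--     palette = [
--         '#e74c3c', # Rouge
--         '#3498db', # Bleu
--         '#2ecc71', # Vert
--         '#f39c12', # Orange
--         '#9b59b6', # Violet
--         '#1abc9c', # Turquoise
--         '#34495e', # Gris foncé
--         '#d35400', # Orange foncé
--         '#8e44ad', # Pourpre
--         '#2c3e50', # Bleu nuit
--     ]
--     # Si on a plus de labels que de couleurs, on boucle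
--     return [palette[i % len(palette)] for i in range(len(labels))]
-- ===== SOURCE B (Python) =====
-- def get_legume_colors(labels):
--     """Génère une palette de couleurs cohérente pour une liste de labels."""
--     palette = [
--         '#e74c3c', # Rouge
--         '#3498db', # Bleu
--         '#2ecc71', # Vert
--         '#f39c12', # Orange
--         '#9b59b6', # Violet
--         '#1abc9c', # Turquoise
--         '#34495e', # Gris foncé
--         '#d35400', # Orange foncé
--         '#8e44ad', # Pourpre
--         '#2c3e50', # Bleu nuit
--     ]
--     # Build the answer in whole-palette blocks: q full copies plus the first r colours.
--     q, r = divmod(len(labels), len(palette))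
--     return palette * q + palette[:r]
-- ===== Notes on version B (the rewrite author's own statement) =====
-- stated objective: idiomatic
-- what changed: Replaces the per-element index-modulo comprehension with block construction: divmod the label count by the palette size and return q whole palette copies plus a slice of the first r colours, with no per-label loop.
import Mathlib
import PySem

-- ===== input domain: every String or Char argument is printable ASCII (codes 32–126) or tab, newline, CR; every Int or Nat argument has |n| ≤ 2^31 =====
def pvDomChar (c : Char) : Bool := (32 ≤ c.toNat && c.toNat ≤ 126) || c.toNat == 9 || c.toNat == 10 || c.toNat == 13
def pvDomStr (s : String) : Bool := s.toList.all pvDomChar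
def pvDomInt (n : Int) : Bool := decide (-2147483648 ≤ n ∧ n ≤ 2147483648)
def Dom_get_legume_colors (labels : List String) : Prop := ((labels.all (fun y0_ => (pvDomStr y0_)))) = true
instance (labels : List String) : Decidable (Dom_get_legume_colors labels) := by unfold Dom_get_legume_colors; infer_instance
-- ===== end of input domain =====

-- B replaces A's per-element index-modulo comprehension by block construction (q whole palette copies + a slice of the remainder); idiomatic, same cost.

-- the palette literal shared by both Pythons
def pvPalette : List String :=
  ["#e74c3c", "#3498db", "#2ecc71", "#f39c12", "#9b59b6",
   "#1abc9c", "#34495e", "#d35400", "#8e44ad", "#2c3e50"]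

-- ===== PORT A =====
-- [palette[i % len(palette)] for i in range(len(labels))]
def get_legume_colors (labels : List String) : List String :=
  (PySem.List.pyRange 0 (labels.length : Int) 1).map
    (fun i => PySem.List.pyGetD pvPalette (PySem.Int.mod i (pvPalette.length : Int)) "")

-- ===== PORT B =====
-- q, r = divmod(len(labels), len(palette)); palette * q + palette[:r]
-- (both operands of divmod are nonnegative, so Python's divmod is Nat div/mod here)
def get_legume_colors_alt (labels : List String) : List String :=
  let q := labels.length / pvPalette.length
  let r := labels.length % pvPalette.length
  (List.replicate q pvPalette).flatten ++ pvPalette.take r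

-- ===== PRECONDITION & SPEC =====
def Spec_get_legume_colors (labels : List String) (out : List String) : Prop := out = get_legume_colors_alt labels
instance (labels : List String) (out : List String) : Decidable (Spec_get_legume_colors labels out) := by unfold Spec_get_legume_colors; infer_instance

-- ===== CLAIM =====
def Claim_equal_get_legume_colors : Prop := ∀ (labels : List String), Dom_get_legume_colors labels → Spec_get_legume_colors labels (get_legume_colors labels)

-- ===== LEMMAS AND PROOFS =====

theorem get_legume_colors_closed (labels : List String) :
    get_legume_colors labels
      = (List.range labels.length).map (fun j => pvPalette.getD (j % 10) "") := by
  unfold get_legume_colors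
  rw [PySem.List.pyRange_zero_nat, List.map_map]
  apply List.map_congr_left
  intro j _
  have h10 : (pvPalette.length : Int) = 10 := by simp [pvPalette]
  rw [Function.comp_apply, h10,
      PySem.Int.mod_eq_emod_of_pos (show (0:Int) < 10 by omega)]
  have : ((j : Int) % 10) = ((j % 10 : Nat) : Int) := by push_cast; ring_nf
  rw [this, PySem.List.pyGetD_natCast]

theorem pvBase (r : Nat) (hr : r < 10) :
    (List.range r).map (fun j => pvPalette.getD (j % 10) "") = pvPalette.take r := by
  apply List.ext_getElem
  · simp [pvPalette]; omega
  · intro j h1 h2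
    simp only [List.getElem_map, List.getElem_range, List.getElem_take]
    simp only [List.length_map, List.length_range] at h1
    have hj : j % 10 = j := Nat.mod_eq_of_lt (by omega)
    rw [hj, List.getD_eq_getElem _ _ (by simp [pvPalette]; omega)]

theorem pvBlocks (q r : Nat) (hr : r < 10) :
    (List.range (10 * q + r)).map (fun j => pvPalette.getD (j % 10) "")
      = (List.replicate q pvPalette).flatten ++ pvPalette.take r := by
  induction q with
  | zero => simpa using pvBase r hr
  | succ q ih =>
    have h : 10 * (q + 1) + r = 10 + (10 * q + r) := by ring
    rw [h, List.range_add, List.map_append, List.map_map]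
    have h1 : (List.range 10).map (fun j => pvPalette.getD (j % 10) "") = pvPalette := by decide
    have h2 : (List.range (10 * q + r)).map
        ((fun j => pvPalette.getD (j % 10) "") ∘ (fun i => 10 + i))
        = (List.range (10 * q + r)).map (fun j => pvPalette.getD (j % 10) "") := by
      apply List.map_congr_left
      intro j _
      have : (10 + j) % 10 = j % 10 := by omega
      simp [Function.comp, this]
    rw [h1, h2, ih, List.replicate_succ, List.flatten_cons, List.append_assoc]

-- ===== VERDICT =====
theorem get_legume_colors_spec : Claim_equal_get_legume_colors := by
  intro labels _
  unfold Spec_get_legume_colors get_legume_colors_alt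
  rw [get_legume_colors_closed]
  have hp : pvPalette.length = 10 := by decide
  have hn : labels.length = 10 * (labels.length / 10) + labels.length % 10 :=
    (Nat.div_add_mod _ _).symm ▸ by omega
  rw [hp]
  calc (List.range labels.length).map (fun j => pvPalette.getD (j % 10) "")
      = (List.range (10 * (labels.length / 10) + labels.length % 10)).map
          (fun j => pvPalette.getD (j % 10) "") := by rw [← hn]
    _ = _ := pvBlocks _ _ (Nat.mod_lt _ (by omega))
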